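-- pv_equiv track=rewrite | github.com/demondeployer7/VLM_Finetuning | gemma_inference.py | extract_class_name
-- ===== SOURCE A (Python) =====
-- CLASSES = [
--     'Fabric Tear near zipper',
--     'No evidence for reporting any significant zip issue',
--     'Zip pull tab broken or missing or detached',
--     'Zip slider completely off track',
--     'Zip slider not interlocking zip',
--     'Zip slider off track from one side',
--     'Zip teeth damaged'
-- ]
--
-- def extract_class_name(prediction_text, valid_classes=CLASSES):
--     """
--     Extract the class name from model output.
--     Handles cases where model outputs extra text.
--     """
--     prediction_text = prediction_text.strip()
--
--     # Try exact match first
--     if prediction_text in valid_classes: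
--         return prediction_text
--
--     # Try case-insensitive match
--     for cls in valid_classes:
--         if prediction_text.lower() == cls.lower():
--             return cls
--
--     # Try partial match (class name contained in output)
--     for cls in valid_classes:
--         if cls.lower() in prediction_text.lower():
--             return cls
--
--     # If no match, return the raw prediction
--     return prediction_text
-- ===== SOURCE B (Python) =====
-- CLASSES = [
--     'Fabric Tear near zipper',
--     'No evidence for reporting any significant zip issue',
--     'Zip pull tab broken or missing or detached',
--     'Zip slider completely off track',
--     'Zip slider not interlocking zip',
--     'Zip slider off track from one side',
--     'Zip teeth damaged'
-- ]
--
-- def extract_class_name(prediction_text, valid_classes=CLASSES):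
--     p = prediction_text.strip()
--     p_low = p.lower()
--     best_tier = 3
--     best = None
--     for cls in valid_classes:
--         if cls == p:
--             tier = 0
--         elif cls.lower() == p_low:
--             tier = 1
--         elif cls.lower() in p_low:
--             tier = 2
--         else:
--             continue
--         if tier < best_tier:
--             best_tier, best = tier, cls
--     return best if best is not None else p
-- ===== Notes on version B (the rewrite author's own statement) =====
-- stated objective: alternative
-- what changed: A's three sequential scans (exact membership test, case-insensitive scan, substring scan) are replaced by a single pass over valid_classes that tracks the best (lowest) match tier seen so far, updating only on a strictly better tier so the first class of the best tier wins.
import Mathlib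
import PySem

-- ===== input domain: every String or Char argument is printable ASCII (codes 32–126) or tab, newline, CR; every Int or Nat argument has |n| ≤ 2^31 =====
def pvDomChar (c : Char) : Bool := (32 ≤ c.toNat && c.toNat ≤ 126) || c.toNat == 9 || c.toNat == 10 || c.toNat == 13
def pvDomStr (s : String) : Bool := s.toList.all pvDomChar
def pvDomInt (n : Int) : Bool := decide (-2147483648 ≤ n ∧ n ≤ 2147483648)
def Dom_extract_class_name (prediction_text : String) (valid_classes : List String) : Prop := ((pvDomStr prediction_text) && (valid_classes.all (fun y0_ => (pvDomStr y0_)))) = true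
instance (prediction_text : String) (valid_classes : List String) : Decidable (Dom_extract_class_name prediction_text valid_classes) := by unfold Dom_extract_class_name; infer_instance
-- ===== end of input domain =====

-- B replaces A's membership test plus two sequential scans by one pass that keeps the
-- best (lowest) match tier seen so far; objective: alternative single-pass decomposition.

-- ===== PORT A =====
def extract_class_name (prediction_text : String) (valid_classes : List String) : String :=
  let p := PySem.Str.strip prediction_text
  if valid_classes.contains p then p
  else
    match valid_classes.find? (fun cls => PySem.Str.lower p == PySem.Str.lower cls) with
    | some cls => cls
    | none =>
      match valid_classes.find? (fun cls => PySem.Str.isIn (PySem.Str.lower cls) (PySem.Str.lower p)) with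
      | some cls => cls
      | none => p

-- ===== PORT B =====
-- tier of a candidate class: 0 exact, 1 case-insensitive, 2 substring, 3 no match
def pvTier (p plow cls : String) : Nat :=
  if cls == p then 0
  else if PySem.Str.lower cls == plow then 1
  else if PySem.Str.isIn (PySem.Str.lower cls) plow then 2
  else 3

-- Source B's loop: walk the list once, update best on a strictly lower tier
def pvLoop (p plow : String) : List String → Nat → Option String → String
  | [], _, b => match b with | some c => c | none => p
  | c :: rest, t, b =>
      let tier := pvTier p plow c
      if tier < t then pvLoop p plow rest tier (some c) else pvLoop p plow rest t b

def extract_class_name_alt (prediction_text : String) (valid_classes : List String) : String :=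
  let p := PySem.Str.strip prediction_text
  let plow := PySem.Str.lower p
  pvLoop p plow valid_classes 3 none

-- ===== PRECONDITION & SPEC =====
def Spec_extract_class_name (prediction_text : String) (valid_classes : List String) (out : String) : Prop := out = extract_class_name_alt prediction_text valid_classes
instance (prediction_text : String) (valid_classes : List String) (out : String) : Decidable (Spec_extract_class_name prediction_text valid_classes out) := by unfold Spec_extract_class_name; infer_instance

-- ===== CLAIM (what is proved, stated in full; the proofs are below) =====
def Claim_equal_extract_class_name : Prop := ∀ (prediction_text : String) (valid_classes : List String), Dom_extract_class_name prediction_text valid_classes → Spec_extract_class_name prediction_text valid_classes (extract_class_name prediction_text valid_classes)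

-- ===== LEMMAS AND PROOFS =====

-- characterization of B's single pass: A's three-stage cascade, cut off at the current threshold t
set_option maxHeartbeats 2000000 in
lemma pvLoop_eq (p plow : String) (l : List String) :
    ∀ (t : Nat) (b : Option String), t ≤ 3 →
    pvLoop p plow l t b =
      if 0 < t ∧ p ∈ l then p
      else if 1 < t ∧ (l.find? (fun c => PySem.Str.lower c == plow)).isSome then
        (l.find? (fun c => PySem.Str.lower c == plow)).getD p
      else if 2 < t ∧ (l.find? (fun c => PySem.Str.isIn (PySem.Str.lower c) plow)).isSome then
        (l.find? (fun c => PySem.Str.isIn (PySem.Str.lower c) plow)).getD p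
      else b.getD p := by
  induction l with
  | nil => intro t b ht; cases b <;> simp [pvLoop]
  | cons c rest ih =>
    intro t b ht
    have n00 : ¬ ((0:Nat) < 0) := by omega
    have n10 : ¬ ((1:Nat) < 0) := by omega
    have n20 : ¬ ((2:Nat) < 0) := by omega
    have p01 : (0:Nat) < 1 := by omega
    have n11 : ¬ ((1:Nat) < 1) := by omega
    have n21 : ¬ ((2:Nat) < 1) := by omega
    have p02 : (0:Nat) < 2 := by omega
    have p12 : (1:Nat) < 2 := by omega
    have n22 : ¬ ((2:Nat) < 2) := by omega
    by_cases h0 : c = p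
    · subst h0
      have hm : c ∈ (c :: rest) := List.mem_cons_self ..
      by_cases hpos : 0 < t
      · have htier : pvTier c plow c = 0 := by simp [pvTier]
        rw [show pvLoop c plow (c :: rest) t b
              = pvLoop c plow rest 0 (some c) from by
            simp only [pvLoop, htier]; rw [if_pos hpos]]
        rw [ih 0 (some c) (by omega)]
        clear ih htier; split_ifs <;> first | rfl | tauto
      · have ht0 : t = 0 := by omega
        subst ht0
        rw [show pvLoop c plow (c :: rest) 0 b = pvLoop c plow rest 0 b from by
            simp [pvLoop]]
        rw [ih 0 b (by omega)]
        clear ih; split_ifs <;> first | rfl | tauto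
    · have hbeq : ¬ ((c == p) = true) := by simp [h0]
      have hpc : ¬ p = c := fun h => h0 h.symm
      have hmem : p ∈ (c :: rest) ↔ p ∈ rest := by simp [List.mem_cons, hpc]
      have hsome : (some c).isSome = true := rfl
      by_cases h1 : (PySem.Str.lower c == plow) = true
      · have htier : pvTier p plow c = 1 := by
          simp only [pvTier, if_neg hbeq, if_pos h1]
        have hfind : (c :: rest).find? (fun c => PySem.Str.lower c == plow) = some c :=
          List.find?_cons_of_pos h1
        by_cases ht2 : 1 < t
        · have hpt : 0 < t := by omega
          rw [show pvLoop p plow (c :: rest) t b = pvLoop p plow rest 1 (some c) from by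
              simp only [pvLoop, htier]; rw [if_pos ht2]]
          rw [ih 1 (some c) (by omega), hfind]
          clear ih htier hfind h1 hbeq h0 hpc ht; split_ifs <;> first | rfl | tauto
        · have hnt : ¬ 2 < t := by omega
          rw [show pvLoop p plow (c :: rest) t b = pvLoop p plow rest t b from by
              simp only [pvLoop, htier]; rw [if_neg (by omega)]]
          rw [ih t b ht, hfind]
          clear ih htier hfind h1 hbeq h0 hpc ht; split_ifs <;> first | rfl | tauto
      · by_cases h2 : (PySem.Str.isIn (PySem.Str.lower c) plow) = true
        · have htier : pvTier p plow c = 2 := by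
            simp only [pvTier, if_neg hbeq, if_neg h1, if_pos h2]
          have hfind1 : (c :: rest).find? (fun c => PySem.Str.lower c == plow)
              = rest.find? (fun c => PySem.Str.lower c == plow) :=
            List.find?_cons_of_neg (fun hh => h1 hh)
          have hfind2 : (c :: rest).find? (fun c => PySem.Str.isIn (PySem.Str.lower c) plow) = some c :=
            List.find?_cons_of_pos h2
          by_cases ht3 : 2 < t
          · have hpt : 0 < t := by omega
            have hpt1 : 1 < t := by omega
            rw [show pvLoop p plow (c :: rest) t b = pvLoop p plow rest 2 (some c) from by
              simp only [pvLoop, htier]; rw [if_pos ht3]]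
            rw [ih 2 (some c) (by omega), hfind1, hfind2]
            clear ih htier hfind1 hfind2 h1 h2 hbeq h0 hpc ht; split_ifs <;> first | rfl | tauto
          · rw [show pvLoop p plow (c :: rest) t b = pvLoop p plow rest t b from by
              simp only [pvLoop, htier]; rw [if_neg (by omega)]]
            rw [ih t b ht, hfind1, hfind2]
            clear ih htier hfind1 hfind2 h1 h2 hbeq h0 hpc ht; split_ifs <;> first | rfl | tauto
        · have htier : pvTier p plow c = 3 := by
            simp only [pvTier, if_neg hbeq, if_neg h1, if_neg h2]
          have hfind1 : (c :: rest).find? (fun c => PySem.Str.lower c == plow)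
              = rest.find? (fun c => PySem.Str.lower c == plow) :=
            List.find?_cons_of_neg (fun hh => h1 hh)
          have hfind2 : (c :: rest).find? (fun c => PySem.Str.isIn (PySem.Str.lower c) plow)
              = rest.find? (fun c => PySem.Str.isIn (PySem.Str.lower c) plow) :=
            List.find?_cons_of_neg (fun hh => h2 hh)
          rw [show pvLoop p plow (c :: rest) t b = pvLoop p plow rest t b from by
              simp only [pvLoop, htier]; rw [if_neg (by omega)]]
          rw [ih t b ht, hfind1, hfind2]
          clear ih htier hfind1 hfind2 h1 h2 hbeq h0 hpc ht; split_ifs <;> first | rfl | tauto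

-- A's lower-equality predicate is B's, with the equality flipped
lemma find?_lowEq_comm (p : String) (l : List String) :
    l.find? (fun cls => PySem.Str.lower p == PySem.Str.lower cls)
      = l.find? (fun c => PySem.Str.lower c == PySem.Str.lower p) := by
  induction l with
  | nil => rfl
  | cons c r ih =>
    simp only [List.find?]
    rw [show (PySem.Str.lower p == PySem.Str.lower c) = (PySem.Str.lower c == PySem.Str.lower p) from by
      simp [eq_comm], ih]

-- ===== VERDICT (by name: the statement is the Claim_ definition above) =====
theorem extract_class_name_spec : Claim_equal_extract_class_name := by
  intro prediction_text valid_classes _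
  unfold Spec_extract_class_name
  simp only [extract_class_name, extract_class_name_alt]
  rw [pvLoop_eq _ _ _ 3 none (by omega)]
  rw [find?_lowEq_comm]
  by_cases hc : PySem.Str.strip prediction_text ∈ valid_classes
  · rw [if_pos (by simpa using hc), if_pos ⟨by omega, hc⟩]
  · rw [if_neg (by simpa using hc), if_neg (fun h => hc h.2)]
    cases hf : valid_classes.find? (fun c => PySem.Str.lower c == PySem.Str.lower (PySem.Str.strip prediction_text)) with
    | some cls => simp
    | none =>
      rw [if_neg (by simp)]
      cases hg : valid_classes.find? (fun cls => PySem.Str.isIn (PySem.Str.lower cls) (PySem.Str.lower (PySem.Str.strip prediction_text))) with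
      | some cls => simp
      | none => simp
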